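-- pv_equiv track=rewrite | github.com/vasole/pymca | PyMca5/PyMcaGui/physics/xrf/McaAdvancedFit.py | array2SpecMca
-- ===== SOURCE A (Python) =====
-- def array2SpecMca(data):
--     """ Write a python array into a Spec array.
--         Return the string containing the Spec array
--     """
--     tmpstr = "@A"
--     length = len(data)
--     for idx in range(0, length, 16):
--         if idx+15 < length:
--             for i in range(0,16):
--                 tmpstr += " %.4f" % data[idx+i]
--             if idx+16 != length:
--                 tmpstr += "\\"
--         else:
--             for i in range(idx, length):
--                 tmpstr += " %.4f" % data[i]
--         tmpstr += "\n"
--     return tmpstr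
-- ===== SOURCE B (Python) =====
-- def array2SpecMca(data):
--     """ Write a python array into a Spec array.
--         Return the string containing the Spec array
--     """
--     parts = ["@A"]
--     for i, v in enumerate(data):
--         if i and i % 16 == 0:
--             parts.append("\\\n")
--         parts.append(" %.4f" % v)
--     if data:
--         parts.append("\n")
--     return "".join(parts)
-- ===== Notes on version B (the rewrite author's own statement) =====
-- stated objective: simpler
-- what changed: A's nested structure (an outer loop over chunk-start indices with a full-chunk/tail branch, an inner 16-step formatting loop, and a conditional continuation backslash decided by comparing idx+16 to the length) is replaced by one flat pass over enumerate(data) that appends a token list: a '\\'+newline separator exactly when the index is a positive multiple of 16, then the formatted value, with a final newline token for nonempty data and a single ''.join at the end.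
import Mathlib
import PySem

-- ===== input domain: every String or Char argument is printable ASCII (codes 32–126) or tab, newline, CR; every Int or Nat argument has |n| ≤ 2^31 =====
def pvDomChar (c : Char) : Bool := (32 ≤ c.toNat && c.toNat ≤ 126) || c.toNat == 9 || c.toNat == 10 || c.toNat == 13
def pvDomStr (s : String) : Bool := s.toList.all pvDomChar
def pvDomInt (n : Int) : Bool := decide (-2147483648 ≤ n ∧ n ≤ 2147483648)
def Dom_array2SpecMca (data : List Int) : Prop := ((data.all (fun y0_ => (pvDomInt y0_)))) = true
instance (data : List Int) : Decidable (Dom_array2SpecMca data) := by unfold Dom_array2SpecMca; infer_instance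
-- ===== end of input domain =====

-- B replaces A's chunk-indexed nested loops (with per-chunk continuation-backslash branches)
-- by a single flat pass over enumerate(data) that decides separators from i % 16 (objective: simpler).

-- " %.4f" % n for an integer n: exact, since |n| ≤ 2^31 < 2^53 and the 4 decimals are zeros.
def pvFmt (n : Int) : String := " " ++ PySem.Int.toStr n ++ ".0000"

-- ===== PORT A =====
def array2SpecMca (data : List Int) : String :=
  let length : Int := data.length
  (PySem.List.pyRange 0 length 16).foldl
    (fun tmpstr idx =>
      (if idx + 15 < length then
        let t := (PySem.List.pyRange 0 16 1).foldl
          (fun s i => s ++ pvFmt (PySem.List.pyGetD data (idx + i) 0)) tmpstr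
        if idx + 16 ≠ length then t ++ "\\" else t
      else
        (PySem.List.pyRange idx length 1).foldl
          (fun s i => s ++ pvFmt (PySem.List.pyGetD data i 0)) tmpstr) ++ "\n")
    "@A"

-- ===== PORT B =====
-- one flat pass: for i, v in enumerate(data): append "\\\n" when i and i % 16 == 0, then " %.4f" % v
def array2SpecMca_alt (data : List Int) : String :=
  let parts := (PySem.List.enumerate data 0).foldl
    (fun parts iv =>
      let parts := if iv.1 ≠ 0 ∧ PySem.Int.mod iv.1 16 = 0 then parts ++ ["\\\n"] else parts
      parts ++ [pvFmt iv.2]) ["@A"]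
  let parts := if data ≠ [] then parts ++ ["\n"] else parts
  PySem.Str.join "" parts

-- ===== PRECONDITION & SPEC =====
def Spec_array2SpecMca (data : List Int) (out : String) : Prop := out = array2SpecMca_alt data
instance (data : List Int) (out : String) : Decidable (Spec_array2SpecMca data out) := by unfold Spec_array2SpecMca; infer_instance

-- ===== CLAIM (what is proved, stated in full; the proofs are below) =====
def Claim_equal_array2SpecMca : Prop := ∀ (data : List Int), Dom_array2SpecMca data → Spec_array2SpecMca data (array2SpecMca data)

-- ===== LEMMAS AND PROOFS =====

-- '"".join(" %.4f" % v for v in chunk)' (proof-side reference value)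
def pvChunk (l : List Int) : String := PySem.Str.join "" (l.map pvFmt)

-- reference form of the output tail (after "@A"), by recursion on 16-element chunks
def specTail : List Int → String
  | [] => ""
  | x :: xs =>
    pvChunk ((x :: xs).take 16) ++
      (if xs.drop 15 = [] then "\n" else "\\\n" ++ specTail (xs.drop 15))
termination_by l => l.length
decreasing_by simp

theorem specTail_nil : specTail [] = "" := by simp [specTail]

theorem specTail_ne_nil (l : List Int) (h : l ≠ []) :
    specTail l = pvChunk (l.take 16) ++
      (if l.drop 16 = [] then "\n" else "\\\n" ++ specTail (l.drop 16)) := by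
  cases l with
  | nil => exact absurd rfl h
  | cons x xs => rw [specTail.eq_def]; simp

theorem intercalate_nil_char (L : List (List Char)) : List.intercalate [] L = L.flatten := by
  induction L with
  | nil => simp [List.intercalate]
  | cons a l ih =>
    cases l with
    | nil => simp [List.intercalate]
    | cons b t => simp_all [List.intercalate, List.intersperse]

theorem joinNil_append (a b : List String) :
    PySem.Str.join "" (a ++ b) = PySem.Str.join "" a ++ PySem.Str.join "" b := by
  simp [PySem.Str.join, PySem.Chars.join, intercalate_nil_char]

theorem join_singleton (sep c : String) : PySem.Str.join sep [c] = c := by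
  simp [PySem.Str.join, PySem.Chars.join, List.intercalate]

theorem pvChunk_append (a b : List Int) : pvChunk (a ++ b) = pvChunk a ++ pvChunk b := by
  simp [pvChunk, PySem.Str.join, PySem.Chars.join, intercalate_nil_char]

theorem pvChunk_nil : pvChunk ([] : List Int) = "" := by decide

theorem pvChunk_singleton (v : Int) : pvChunk [v] = pvFmt v := by
  simp [pvChunk, PySem.Str.join, PySem.Chars.join, List.intercalate]

-- range(a, b, 16) induction forms
theorem pyRange16_nil (a b : Int) (h : b ≤ a) : PySem.List.pyRange a b 16 = [] := by
  rw [PySem.List.pyRange_of_pos a b (by norm_num)]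
  simp [show ¬ a < b by omega]

theorem pyRange16_cons (a b : Int) (h : a < b) :
    PySem.List.pyRange a b 16 = a :: PySem.List.pyRange (a + 16) b 16 := by
  rw [PySem.List.pyRange_of_pos a b (by norm_num),
      PySem.List.pyRange_of_pos (a + 16) b (by norm_num)]
  by_cases h2 : a + 16 < b
  · have : ((b - a + 16 - 1) / 16).toNat = ((b - (a + 16) + 16 - 1) / 16).toNat + 1 := by omega
    rw [if_pos h, if_pos h2, this, List.range_succ_eq_map]
    simp [List.map_map, Function.comp]
    intro k _
    ring
  · have : ((b - a + 16 - 1) / 16).toNat = 1 := by omega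
    rw [if_pos h, if_neg h2, this]
    simp

-- the accumulator factors out of A's inner formatting loops
theorem foldl_chunk (l : List Int) (s : String) :
    l.foldl (fun s v => s ++ pvFmt v) s = s ++ pvChunk l := by
  induction l generalizing s with
  | nil => simp [pvChunk_nil]
  | cons v t ih =>
    have : pvChunk (v :: t) = pvFmt v ++ pvChunk t := by
      simpa [pvChunk_singleton] using pvChunk_append [v] t
    simp [List.foldl_cons, ih, this, String.append_assoc]

-- A's full-chunk inner loop 'for i in range(0,16)', generalized over the chunk width
theorem inner_loop (m : Nat) (xs : List Int) (k : Nat) (s : String) (h : k + m ≤ xs.length) :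
    (PySem.List.pyRange 0 (m : Int) 1).foldl
        (fun s i => s ++ pvFmt (PySem.List.pyGetD xs ((k : Int) + i) 0)) s
      = s ++ pvChunk ((xs.drop k).take m) := by
  induction m generalizing s with
  | zero => simp [pvChunk_nil]
  | succ m ih =>
    have h' : k + m ≤ xs.length := by omega
    have hrng : PySem.List.pyRange 0 ((m : Int) + 1) 1
        = PySem.List.pyRange 0 (m : Int) 1 ++ [(m : Int)] :=
      PySem.List.pyRange_one_succ_right (by positivity)
    have hkm : k + m < xs.length := by omega
    have hget : PySem.List.pyGetD xs ((k : Int) + (m : Int)) 0 = xs[k + m] := by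
      rw [show (k : Int) + (m : Int) = ((k + m : Nat) : Int) by push_cast; ring,
          PySem.List.pyGetD_natCast]
      simp [List.getD_eq_getElem?_getD, List.getElem?_eq_getElem hkm]
    have htake : (xs.drop k).take (m + 1) = (xs.drop k).take m ++ [xs[k + m]] := by
      rw [List.take_add_one]
      have : (xs.drop k)[m]? = some xs[k + m] := by
        rw [List.getElem?_drop, List.getElem?_eq_getElem hkm]
      simp [this]
    rw [show ((m + 1 : Nat) : Int) = (m : Int) + 1 by push_cast; ring, hrng,
        List.foldl_append, ih s h', htake, pvChunk_append, pvChunk_singleton]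
    simp [List.foldl_cons, hget, String.append_assoc]

-- A's outer loop from chunk start k equals specTail of the remaining suffix
theorem loopA (m : Nat) (xs : List Int) (k : Nat) (s : String) (hm : xs.length ≤ k + 16 * m) :
    (PySem.List.pyRange (k : Int) (xs.length : Int) 16).foldl
        (fun tmpstr idx =>
          (if idx + 15 < (xs.length : Int) then
            let t := (PySem.List.pyRange 0 16 1).foldl
              (fun s i => s ++ pvFmt (PySem.List.pyGetD xs (idx + i) 0)) tmpstr
            if idx + 16 ≠ (xs.length : Int) then t ++ "\\" else t
          else
            (PySem.List.pyRange idx (xs.length : Int) 1).foldl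
              (fun s i => s ++ pvFmt (PySem.List.pyGetD xs i 0)) tmpstr) ++ "\n") s
      = s ++ specTail (xs.drop k) := by
  induction m generalizing k s with
  | zero =>
    have hk : xs.length ≤ k := by omega
    rw [pyRange16_nil _ _ (by exact_mod_cast hk)]
    simp [List.drop_eq_nil_of_le hk, specTail_nil]
  | succ m ih =>
    by_cases hk : xs.length ≤ k
    · rw [pyRange16_nil _ _ (by exact_mod_cast hk)]
      simp [List.drop_eq_nil_of_le hk, specTail_nil]
    · have hk : k < xs.length := by omega
      have hne : xs.drop k ≠ [] := by
        simp [List.drop_eq_nil_iff]; omega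
      rw [pyRange16_cons _ _ (by omega), List.foldl_cons,
          specTail_ne_nil _ hne]
      have hdd : (xs.drop k).drop 16 = xs.drop (k + 16) := by
        rw [List.drop_drop]
      by_cases hfull : k + 16 ≤ xs.length
      · have hcond : (k : Int) + 15 < (xs.length : Int) := by omega
        rw [if_pos hcond]
        dsimp only
        have h16 := inner_loop 16 xs k s (by omega)
        norm_num at h16
        rw [h16]
        by_cases hlast : k + 16 = xs.length
        · have : ¬ ((k : Int) + 16 ≠ (xs.length : Int)) := by omega
          rw [if_neg this, pyRange16_nil _ _ (by omega)]
          have hdnil : (xs.drop k).drop 16 = [] := by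
            rw [hdd]; exact List.drop_eq_nil_of_le (by omega)
          simp [hdnil, String.append_assoc]
        · have : ((k : Int) + 16 ≠ (xs.length : Int)) := by omega
          rw [if_pos this]
          have hrec := ih (k + 16) (s ++ pvChunk ((xs.drop k).take 16) ++ "\\" ++ "\n")
            (by omega)
          rw [show ((k + 16 : Nat) : Int) = (k : Int) + 16 by push_cast; ring] at hrec
          rw [hrec]
          have hdne : (xs.drop k).drop 16 ≠ [] := by
            rw [hdd]; simp [List.drop_eq_nil_iff]; omega
          rw [if_neg hdne, hdd]
          have hbs : ("\\" : String) ++ "\n" = "\\\n" := by decide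
          simp [String.append_assoc, hbs]
      · have hcond : ¬ ((k : Int) + 15 < (xs.length : Int)) := by omega
        rw [if_neg hcond,
            PySem.List.foldl_pyRange_pyGetD' xs 0 (fun s v => s ++ pvFmt v) s
              (by positivity)]
        rw [pyRange16_nil _ _ (by omega)]
        have hdnil : (xs.drop k).drop 16 = [] := by
          rw [hdd]; exact List.drop_eq_nil_of_le (by omega)
        have htk : (xs.drop k).take 16 = xs.drop k :=
          List.take_of_length_le (by simp; omega)
        simp [Int.toNat_natCast, foldl_chunk, hdnil, htk, String.append_assoc]

-- ===== B-side: the flat enumerate pass, characterised elementwise =====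

-- what B contributes for element v at index i
def pvPiece (i : Int) (v : Int) : String :=
  (if i ≠ 0 ∧ PySem.Int.mod i 16 = 0 then "\\\n" else "") ++ pvFmt v

theorem pvPiece_not (i v : Int) (h : ¬ (i ≠ 0 ∧ PySem.Int.mod i 16 = 0)) :
    pvPiece i v = pvFmt v := by
  unfold pvPiece; rw [if_neg h]; simp

theorem pvPiece_yes (i v : Int) (h : i ≠ 0 ∧ PySem.Int.mod i 16 = 0) :
    pvPiece i v = "\\\n" ++ pvFmt v := by
  unfold pvPiece; rw [if_pos h]

theorem pvPiece_boundary (i v : Int) (h : i % 16 = 0) :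
    pvPiece i v = (if i = 0 then "" else "\\\n") ++ pvFmt v := by
  have hm : PySem.Int.mod i 16 = i % 16 := PySem.Int.mod_eq_emod_of_pos (by norm_num)
  by_cases h0 : i = 0
  · rw [if_pos h0, pvPiece_not _ _ (fun hc => hc.1 h0)]; simp
  · rw [if_neg h0, pvPiece_yes _ _ ⟨h0, by rw [hm, h]⟩]

-- the concatenation of B's pieces for a suffix starting at index k
def bodyStr : List Int → Int → String
  | [], _ => ""
  | x :: xs, k => pvPiece k x ++ bodyStr xs (k + 1)

theorem bodyStr_append (a b : List Int) (k : Int) :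
    bodyStr (a ++ b) k = bodyStr a k ++ bodyStr b (k + a.length) := by
  induction a generalizing k with
  | nil => simp [bodyStr]
  | cons x xs ih =>
    simp only [List.cons_append, bodyStr, ih (k + 1), List.length_cons]
    rw [String.append_assoc]
    congr 2
    push_cast
    ring_nf

-- B's fold over enumerate(data) joined with "" equals bodyStr
theorem foldB (l : List Int) (k : Int) (parts : List String) :
    PySem.Str.join ""
        ((PySem.List.enumerate l k).foldl
          (fun parts iv =>
            (if iv.1 ≠ 0 ∧ PySem.Int.mod iv.1 16 = 0 then parts ++ ["\\\n"] else parts)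
              ++ [pvFmt iv.2]) parts)
      = PySem.Str.join "" parts ++ bodyStr l k := by
  induction l generalizing k parts with
  | nil => simp [PySem.List.enumerate_nil, bodyStr]
  | cons x xs ih =>
    rw [PySem.List.enumerate_cons, List.foldl_cons, ih]
    dsimp only
    by_cases hc : (k ≠ 0 ∧ PySem.Int.mod k 16 = 0)
    · rw [if_pos hc]
      simp only [bodyStr, pvPiece_yes _ _ hc, joinNil_append, join_singleton,
        String.append_assoc]
    · rw [if_neg hc]
      simp only [bodyStr, pvPiece_not _ _ hc, joinNil_append, join_singleton,
        String.append_assoc]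

-- inside a chunk (index not a multiple of 16 until past the end) pieces are bare pvFmt
theorem bodyStr_noBoundary (l : List Int) (k : Int)
    (h1 : 0 < PySem.Int.mod k 16) (h2 : PySem.Int.mod k 16 + l.length ≤ 16) :
    bodyStr l k = pvChunk l := by
  induction l generalizing k with
  | nil => simp [bodyStr, pvChunk_nil]
  | cons x xs ih =>
    have hm : PySem.Int.mod k 16 = k % 16 := PySem.Int.mod_eq_emod_of_pos (by norm_num)
    have hm' : PySem.Int.mod (k + 1) 16 = (k + 1) % 16 :=
      PySem.Int.mod_eq_emod_of_pos (by norm_num)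
    rw [hm] at h1 h2
    have hcnd : ¬ (k ≠ 0 ∧ PySem.Int.mod k 16 = 0) := by
      rw [hm]; omega
    have hch : pvChunk (x :: xs) = pvFmt x ++ pvChunk xs := by
      simpa [pvChunk_singleton] using pvChunk_append [x] xs
    rw [show bodyStr (x :: xs) k = pvPiece k x ++ bodyStr xs (k + 1) from rfl,
        pvPiece_not _ _ hcnd, hch]
    cases xs with
    | nil => rw [show bodyStr [] (k + 1) = "" from rfl, pvChunk_nil]
    | cons y ys =>
      rw [ih (k + 1) (by rw [hm']; simp at h2 ⊢; omega)
        (by rw [hm']; simp at h2 ⊢; omega)]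

-- one chunk step of B's flat pass, at a chunk boundary k
theorem bodyStr_chunk (l : List Int) (k : Int) (hl : l ≠ [])
    (_hk0 : 0 ≤ k) (hk : k % 16 = 0) :
    bodyStr l k = (if k = 0 then "" else "\\\n") ++ pvChunk (l.take 16)
      ++ bodyStr (l.drop 16) (k + 16) := by
  cases l with
  | nil => exact absurd rfl hl
  | cons x xs =>
    have hsplit : xs = xs.take 15 ++ xs.drop 15 := (List.take_append_drop 15 xs).symm
    have hrest : bodyStr (xs.take 15) (k + 1) = pvChunk (xs.take 15) := by
      apply bodyStr_noBoundary
      · rw [PySem.Int.mod_eq_emod_of_pos (by norm_num)]; omega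
      · rw [PySem.Int.mod_eq_emod_of_pos (by norm_num)]
        have : (xs.take 15).length ≤ 15 := by simp
        omega
    have hch : pvChunk ((x :: xs).take 16) = pvFmt x ++ pvChunk (xs.take 15) := by
      rw [show (x :: xs).take 16 = x :: xs.take 15 by simp]
      simpa [pvChunk_singleton] using pvChunk_append [x] (xs.take 15)
    calc bodyStr (x :: xs) k
        = pvPiece k x ++ bodyStr (xs.take 15 ++ xs.drop 15) (k + 1) := by
          rw [show bodyStr (x :: xs) k = pvPiece k x ++ bodyStr xs (k + 1) from rfl,
              ← hsplit]
      _ = pvPiece k x ++ (pvChunk (xs.take 15)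
            ++ bodyStr (xs.drop 15) (k + 1 + (xs.take 15).length)) := by
          rw [bodyStr_append, hrest]
      _ = (if k = 0 then "" else "\\\n") ++ pvChunk ((x :: xs).take 16)
            ++ bodyStr ((x :: xs).drop 16) (k + 16) := by
          rw [pvPiece_boundary _ _ hk, hch]
          by_cases hlong : 15 ≤ xs.length
          · have h15 : ((xs.take 15).length : Int) = 15 := by
              simp [List.length_take]; omega
            rw [h15, show (x :: xs).drop 16 = xs.drop 15 by simp [List.drop_succ_cons],
                show k + 1 + 15 = k + 16 by ring]
            simp [String.append_assoc]
          · have hnil15 : xs.drop 15 = [] := List.drop_eq_nil_of_le (by omega)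
            have hnil16 : (x :: xs).drop 16 = [] := by
              simp [List.drop_succ_cons, List.drop_eq_nil_iff]; omega
            rw [hnil15, hnil16, show ∀ j, bodyStr [] j = "" from fun _ => rfl,
                show ∀ j, bodyStr [] j = "" from fun _ => rfl]
            simp [String.append_assoc]

-- B's flat pass from a chunk boundary equals specTail of the remaining suffix
theorem loopB (m : Nat) (l : List Int) (k : Int) (hl : l ≠ [])
    (hk0 : 0 ≤ k) (hk : k % 16 = 0) (hm : l.length ≤ 16 * m) :
    bodyStr l k ++ "\n" = (if k = 0 then "" else "\\\n") ++ specTail l := by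
  induction m generalizing l k with
  | zero =>
    have : l.length = 0 := by omega
    simp [List.length_eq_zero_iff] at this
    exact absurd this hl
  | succ m ih =>
    rw [bodyStr_chunk l k hl hk0 hk, specTail_ne_nil l hl]
    by_cases hd : l.drop 16 = []
    · rw [hd, if_pos rfl, show bodyStr [] (k + 16) = "" from rfl]
      simp [String.append_assoc]
    · have hrec := ih (l.drop 16) (k + 16) hd (by omega) (by omega)
        (by have : (l.drop 16).length = l.length - 16 := by simp
            omega)
      rw [if_neg (show ¬ k + 16 = 0 by omega)] at hrec
      rw [if_neg hd]
      calc ((if k = 0 then "" else "\\\n") ++ pvChunk (l.take 16)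
              ++ bodyStr (l.drop 16) (k + 16)) ++ "\n"
          = (if k = 0 then "" else "\\\n") ++ pvChunk (l.take 16)
              ++ (bodyStr (l.drop 16) (k + 16) ++ "\n") := by
            simp [String.append_assoc]
        _ = (if k = 0 then "" else "\\\n")
              ++ (pvChunk (l.take 16) ++ ("\\\n" ++ specTail (l.drop 16))) := by
            rw [hrec]; simp [String.append_assoc]

-- ===== VERDICT (by name: the statement is the Claim_ definition above) =====
theorem array2SpecMca_spec : Claim_equal_array2SpecMca := by
  intro data _
  unfold Spec_array2SpecMca array2SpecMca array2SpecMca_alt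
  dsimp only
  by_cases hnil : data = []
  · subst hnil
    decide
  · rw [if_pos hnil, joinNil_append, foldB data 0 ["@A"], join_singleton, join_singleton]
    have hA := loopA data.length data 0 "@A" (by omega)
    simp only [Nat.cast_zero, List.drop_zero] at hA
    rw [hA]
    have hB := loopB data.length data 0 hnil (by omega) (by omega) (by omega)
    rw [if_pos rfl] at hB
    rw [String.append_assoc, hB]
    simp
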